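-- pv_equiv track=rewrite | github.com/KrzysztofSwedziol/ASD- | ASD zadania z egzaminów/green red and blue lamps/green red and blue lamps.py | update_status
-- ===== SOURCE A (Python) =====
-- def update_status(lamps_status, operation):
--     start = operation[0]
--     end = operation[1]
--     counter_before = 0
--     counter_after = 0
--     for i in range(start, end+1):
--         if lamps_status[i]%3 == 2:
--             counter_before += 1
--         lamps_status[i] +=1
--         if lamps_status[i]%3 == 2:
--             counter_after += 1
--     return counter_before, counter_after
-- ===== SOURCE B (Python) =====
-- def update_status(lamps_status, operation):
--     start, end = operation
--     counter_before = 0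
--     for i in range(start, end + 1):
--         if lamps_status[i] % 3 == 2:
--             counter_before += 1
--         lamps_status[i] += 1
--     counter_after = 0
--     for i in range(start, end + 1):
--         if lamps_status[i] % 3 == 2:
--             counter_after += 1
--     return counter_before, counter_after
-- ===== Notes on version B (the rewrite author's own statement) =====
-- stated objective: alternative
-- what changed: A's single interleaved pass (count-before, increment, re-read and count-after per index) is split into a mutating pass that only counts 'before' followed by a separate read-only pass over the final values counting 'after'.
-- outside the precondition, e.g. on update_status([1], (-1, 0)): A returns (1, 1), B returns (1, 0)
import Mathlib
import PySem

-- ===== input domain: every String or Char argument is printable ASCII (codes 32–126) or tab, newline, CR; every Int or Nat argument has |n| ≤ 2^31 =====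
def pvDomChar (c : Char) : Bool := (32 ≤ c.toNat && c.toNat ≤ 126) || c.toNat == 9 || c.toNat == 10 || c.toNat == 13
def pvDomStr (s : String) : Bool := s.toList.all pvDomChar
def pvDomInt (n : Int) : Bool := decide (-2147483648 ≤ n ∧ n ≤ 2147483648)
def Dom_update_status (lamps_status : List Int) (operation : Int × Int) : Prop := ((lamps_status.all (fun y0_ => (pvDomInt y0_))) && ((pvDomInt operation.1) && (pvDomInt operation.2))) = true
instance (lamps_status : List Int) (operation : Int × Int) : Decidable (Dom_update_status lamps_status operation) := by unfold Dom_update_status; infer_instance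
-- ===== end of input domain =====

-- B replaces A's single interleaved pass (count-before / increment / re-read and count-after at each index)
-- by a mutating pass that only counts "before", followed by a separate read-only pass over the final values
-- counting "after". Both versions mutate lamps_status in place identically; the equivalence proved is about
-- the returned pair (the mutation is the same on all admitted inputs).

-- ===== PORT A =====
-- loop body of A's single pass (state: lamps list, counter_before, counter_after)
def stepA (st : List Int × Int × Int) (i : Int) : List Int × Int × Int :=
  match PySem.List.pyGet? st.1 i with
  | none => st  -- IndexError in Python; excluded by Pre_
  | some v =>
    let cb := if PySem.Int.mod v 3 = 2 then st.2.1 + 1 else st.2.1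
    let l' := PySem.List.pySetD st.1 i (v + 1)
    let ca := if PySem.Int.mod (PySem.List.pyGetD l' i 0) 3 = 2 then st.2.2 + 1 else st.2.2
    (l', cb, ca)

def update_status (lamps_status : List Int) (operation : Int × Int) : Int × Int :=
  let start := operation.1
  let «end» := operation.2
  let r := (PySem.List.pyRange start («end» + 1) 1).foldl stepA (lamps_status, 0, 0)
  (r.2.1, r.2.2)

-- ===== PORT B =====
-- loop body of B's first (mutating) pass: count "before", then increment
def stepB (st : List Int × Int) (i : Int) : List Int × Int :=
  match PySem.List.pyGet? st.1 i with
  | none => st  -- IndexError in Python; excluded by Pre_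
  | some v => (PySem.List.pySetD st.1 i (v + 1),
               if PySem.Int.mod v 3 = 2 then st.2 + 1 else st.2)

-- loop body of B's second (read-only) pass over the mutated list ys
def afterCount (ys : List Int) (c : Int) (i : Int) : Int :=
  match PySem.List.pyGet? ys i with
  | none => c
  | some v => if PySem.Int.mod v 3 = 2 then c + 1 else c

def update_status_alt (lamps_status : List Int) (operation : Int × Int) : Int × Int :=
  let start := operation.1
  let «end» := operation.2
  let idxs := PySem.List.pyRange start («end» + 1) 1
  let r := idxs.foldl stepB (lamps_status, 0)
  let counter_after := idxs.foldl (afterCount r.1) 0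
  (r.2, counter_after)

-- ===== PRECONDITION & SPEC =====
-- Pre_ excludes operations whose index range leaves the list (A raises IndexError) and non-empty ranges that
-- start at a negative (wraparound) index yet reach past start+len, where the same lamp is visited twice and
-- A's mid-pass after-count versus B's final-value count are both defensible readings of an aliased range.
def Pre_update_status (lamps_status : List Int) (operation : Int × Int) : Prop :=
  operation.1 ≤ operation.2 →
    (-(lamps_status.length : Int) ≤ operation.1 ∧ operation.2 < (lamps_status.length : Int) ∧
     ¬(operation.1 < 0 ∧ operation.1 + (lamps_status.length : Int) ≤ operation.2))
instance (lamps_status : List Int) (operation : Int × Int) : Decidable (Pre_update_status lamps_status operation) := by unfold Pre_update_status; infer_instance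

def pvWitness_update_status : List Int × (Int × Int) := ([1, 2, 3, 5], (1, 3))

def Spec_update_status (lamps_status : List Int) (operation : Int × Int) (out : Int × Int) : Prop := out = update_status_alt lamps_status operation
instance (lamps_status : List Int) (operation : Int × Int) (out : Int × Int) : Decidable (Spec_update_status lamps_status operation out) := by unfold Spec_update_status; infer_instance

-- ===== CLAIM (what is proved, stated in full; the proofs are below) =====
def Claim_equal_update_status : Prop := ∀ (lamps_status : List Int) (operation : Int × Int), Dom_update_status lamps_status operation → Pre_update_status lamps_status operation → Spec_update_status lamps_status operation (update_status lamps_status operation)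

-- ===== LEMMAS AND PROOFS =====

-- the physical (nonnegative) index Python's wraparound indexing addresses
def phys (n : Nat) (i : Int) : Nat := if 0 ≤ i then i.toNat else n - (-i).toNat

theorem pyIdx?_eq_phys {n : Nat} {i : Int} (h : PySem.Raise.InRange n i) :
    PySem.List.pyIdx? n i = some (phys n i) := by
  obtain ⟨h1, h2⟩ := h
  unfold PySem.List.pyIdx? phys
  split_ifs <;> simp_all

theorem phys_lt {n : Nat} {i : Int} (h : PySem.Raise.InRange n i) : phys n i < n := by
  obtain ⟨h1, h2⟩ := h
  unfold phys
  split_ifs <;> omega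

theorem inRange_of_pyGet?_some {xs : List Int} {i v : Int}
    (h : PySem.List.pyGet? xs i = some v) : PySem.Raise.InRange xs.length i := by
  unfold PySem.List.pyGet? PySem.List.pyIdx? at h
  unfold PySem.Raise.InRange
  split_ifs at h <;> simp_all <;> omega

theorem pyGet?_phys (xs : List Int) {i : Int} (h : PySem.Raise.InRange xs.length i) :
    PySem.List.pyGet? xs i = xs[phys xs.length i]? := by
  unfold PySem.List.pyGet?
  rw [pyIdx?_eq_phys h]
  rfl

theorem pySetD_phys (xs : List Int) {i : Int} (v : Int) (h : PySem.Raise.InRange xs.length i) :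
    PySem.List.pySetD xs i v = xs.set (phys xs.length i) v := by
  unfold PySem.List.pySetD PySem.List.pySet?
  rw [pyIdx?_eq_phys h]
  rfl

theorem pyGetD_set_self (xs : List Int) {i : Int} (v : Int) (h : PySem.Raise.InRange xs.length i) :
    PySem.List.pyGetD (xs.set (phys xs.length i) v) i 0 = v := by
  unfold PySem.List.pyGetD PySem.List.pyGet?
  have hlen : (xs.set (phys xs.length i) v).length = xs.length := by simp
  rw [hlen, pyIdx?_eq_phys h]
  simp [phys_lt h]

theorem stepB_some {xs : List Int} {cb : Int} {i v : Int}
    (h : PySem.List.pyGet? xs i = some v) :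
    stepB (xs, cb) i = (xs.set (phys xs.length i) (v + 1),
                        if PySem.Int.mod v 3 = 2 then cb + 1 else cb) := by
  unfold stepB
  rw [h]
  dsimp only
  rw [pySetD_phys xs (v + 1) (inRange_of_pyGet?_some h)]

theorem stepB_fst_length (st : List Int × Int) (i : Int) : (stepB st i).1.length = st.1.length := by
  obtain ⟨xs, cb⟩ := st
  cases h : PySem.List.pyGet? xs i with
  | none => unfold stepB; rw [h]
  | some v => rw [stepB_some h]; simp

-- B's first pass preserves the length of the list
theorem foldB_length (L : List Int) (xs : List Int) (cb : Int) :
    (L.foldl stepB (xs, cb)).1.length = xs.length := by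
  induction L generalizing xs cb with
  | nil => rfl
  | cons i L ih =>
    simp only [List.foldl_cons]
    have h := stepB_fst_length (xs, cb) i
    calc (L.foldl stepB (stepB (xs, cb) i)).1.length
        = (L.foldl stepB ((stepB (xs, cb) i).1, (stepB (xs, cb) i).2)).1.length := by rfl
      _ = (stepB (xs, cb) i).1.length := ih _ _
      _ = xs.length := h

-- B's first pass does not change entries at physical indices it never visits
theorem foldB_untouched (L : List Int) (xs : List Int) (cb : Int) (j : Nat)
    (hj : ∀ i ∈ L, phys xs.length i ≠ j) :
    ((L.foldl stepB (xs, cb)).1)[j]? = xs[j]? := by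
  induction L generalizing xs cb with
  | nil => rfl
  | cons i L ih =>
    simp only [List.foldl_cons]
    cases h : PySem.List.pyGet? xs i with
    | none =>
      have heq : stepB (xs, cb) i = (xs, cb) := by unfold stepB; rw [h]
      rw [heq]
      exact ih xs cb (fun i' hi' => hj i' (List.mem_cons_of_mem _ hi'))
    | some v =>
      rw [stepB_some h]
      have hlen : (xs.set (phys xs.length i) (v + 1)).length = xs.length := by simp
      rw [ih _ _ (fun i' hi' => by rw [hlen]; exact hj i' (List.mem_cons_of_mem _ hi'))]
      rw [List.getElem?_set_ne (hj i List.mem_cons_self)]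

-- main invariant: on a list of valid, physically distinct indices, A's interleaved pass equals
-- B's mutating pass followed by B's read-only pass over the final list
theorem loop_eq (L : List Int) (xs : List Int) (cb ca : Int)
    (hval : ∀ i ∈ L, PySem.Raise.InRange xs.length i)
    (hnd : (L.map (phys xs.length)).Nodup) :
    L.foldl stepA (xs, cb, ca) =
      ((L.foldl stepB (xs, cb)).1, (L.foldl stepB (xs, cb)).2,
       L.foldl (afterCount (L.foldl stepB (xs, cb)).1) ca) := by
  induction L generalizing xs cb ca with
  | nil => rfl
  | cons i L ih =>
    have hr : PySem.Raise.InRange xs.length i := hval i List.mem_cons_self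
    have hlt : phys xs.length i < xs.length := phys_lt hr
    have hvv : PySem.List.pyGet? xs i = some xs[phys xs.length i] := by
      rw [pyGet?_phys xs hr, List.getElem?_eq_getElem hlt]
    have hstepA : stepA (xs, cb, ca) i =
        (xs.set (phys xs.length i) (xs[phys xs.length i] + 1),
         if PySem.Int.mod xs[phys xs.length i] 3 = 2 then cb + 1 else cb,
         if PySem.Int.mod (xs[phys xs.length i] + 1) 3 = 2 then ca + 1 else ca) := by
      unfold stepA
      rw [hvv]
      dsimp only
      rw [pySetD_phys xs _ hr, pyGetD_set_self xs _ hr]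
    have hstepB : stepB (xs, cb) i =
        (xs.set (phys xs.length i) (xs[phys xs.length i] + 1),
         if PySem.Int.mod xs[phys xs.length i] 3 = 2 then cb + 1 else cb) := stepB_some hvv
    have hlen1 : (xs.set (phys xs.length i) (xs[phys xs.length i] + 1)).length = xs.length := by
      simp
    have hval' : ∀ i' ∈ L,
        PySem.Raise.InRange (xs.set (phys xs.length i) (xs[phys xs.length i] + 1)).length i' := by
      intro i' hi'; rw [hlen1]; exact hval i' (List.mem_cons_of_mem _ hi')
    have hnd' : (L.map (phys (xs.set (phys xs.length i) (xs[phys xs.length i] + 1)).length)).Nodup := by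
      rw [hlen1]
      exact (List.nodup_cons.mp hnd).2
    have hne : ∀ i' ∈ L, phys xs.length i' ≠ phys xs.length i := by
      intro i' hi' hcontra
      have hmem := List.mem_map_of_mem (f := phys xs.length) hi'
      rw [hcontra] at hmem
      exact (List.nodup_cons.mp hnd).1 hmem
    simp only [List.foldl_cons, hstepA, hstepB]
    rw [ih _ _ _ hval' hnd']
    have hlBget : ((L.foldl stepB (xs.set (phys xs.length i) (xs[phys xs.length i] + 1),
        if PySem.Int.mod xs[phys xs.length i] 3 = 2 then cb + 1 else cb)).1)[phys xs.length i]? =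
        some (xs[phys xs.length i] + 1) := by
      rw [foldB_untouched L _ _ _ (fun i' hi' => by rw [hlen1]; exact hne i' hi')]
      rw [List.getElem?_set_self (by omega)]
    have hafter : afterCount (L.foldl stepB (xs.set (phys xs.length i) (xs[phys xs.length i] + 1),
        if PySem.Int.mod xs[phys xs.length i] 3 = 2 then cb + 1 else cb)).1 ca i =
        if PySem.Int.mod (xs[phys xs.length i] + 1) 3 = 2 then ca + 1 else ca := by
      unfold afterCount
      have hlenB := foldB_length L (xs.set (phys xs.length i) (xs[phys xs.length i] + 1))
        (if PySem.Int.mod xs[phys xs.length i] 3 = 2 then cb + 1 else cb)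
      have hrB : PySem.Raise.InRange (L.foldl stepB (xs.set (phys xs.length i)
          (xs[phys xs.length i] + 1), if PySem.Int.mod xs[phys xs.length i] 3 = 2 then cb + 1
          else cb)).1.length i := by rw [hlenB, hlen1]; exact hr
      rw [pyGet?_phys _ hrB, hlenB, hlen1, hlBget]
    rw [hafter]

theorem update_status_spec : Claim_equal_update_status := by
  unfold Claim_equal_update_status
  intro lamps op _hdom hpre
  unfold Spec_update_status update_status update_status_alt
  dsimp only
  by_cases hle : op.1 ≤ op.2
  · obtain ⟨h1, h2, h3⟩ := hpre hle
    have hval : ∀ i ∈ PySem.List.pyRange op.1 (op.2 + 1) 1, PySem.Raise.InRange lamps.length i := by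
      intro i hi
      rw [PySem.List.mem_pyRange_one] at hi
      exact ⟨by omega, by omega⟩
    have hnd : ((PySem.List.pyRange op.1 (op.2 + 1) 1).map (phys lamps.length)).Nodup := by
      refine (PySem.List.nodup_pyRange_one op.1 (op.2 + 1)).map_on ?_
      intro i hi j hj hij
      rw [PySem.List.mem_pyRange_one] at hi hj
      unfold phys at hij
      split_ifs at hij <;> omega
    rw [loop_eq _ lamps 0 0 hval hnd]
  · rw [PySem.List.pyRange_one_eq_nil (by omega)]
    rfl
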